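-- pv_equiv track=rewrite | github.com/buddly27/jound | source/scribe/command_line.py | yield_words_from_content
-- ===== SOURCE A (Python) =====
-- import string
--
-- def yield_words_from_content(content):
--     """Yield each word found in *content*.
--
--     Filter out whitespaces, numbers and punctuation.
--
--     Example::
--
--         >>> content = (
--         ...     "Call me Ishmael.  Some years ago--never mind how long "
--         ...     "precisely--having little or no money in my purse, and nothing"
--         ... )
--         >>> list(yield_words_from_content(content))
--         [
--             "Call", "me", "Ishmael", "Some", "years", "ago", "never", "mind",
--             "how", "long", "precisely", "having", "little", "or", "no", "money",
--             "in", "my", "purse", "and"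
--         ]
--
--     """
--     word = ""
--
--     for letter in content:
--         if (
--             letter not in string.whitespace and
--             letter not in string.punctuation and
--             not letter.isdigit()
--         ):
--             word += letter
--         elif len(word) > 0:
--             yield word
--             word = ""
-- ===== SOURCE B (Python) =====
-- import string
--
--
-- def yield_words_from_content(content):
--     """Yield each word found in *content* (runs between separators).
--
--     A word is a maximal run of characters that are not whitespace,
--     punctuation or digits, and it is emitted when its terminating
--     separator is reached: the slice between two consecutive separator
--     positions is yielded whenever it is non-empty.
--     """
--     prev = -1
--     for index, letter in enumerate(content):
--         if (
--             letter in string.whitespace or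
--             letter in string.punctuation or
--             letter.isdigit()
--         ):
--             if index - prev > 1:
--                 yield content[prev + 1:index]
--             prev = index
-- ===== Notes on version B (the rewrite author's own statement) =====
-- stated objective: alternative
-- what changed: Replaces A's accumulator/flush word state machine with a scan over separator positions that yields the slice of content between consecutive separators, maintaining only the previous separator index instead of a growing word string.
import Mathlib
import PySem

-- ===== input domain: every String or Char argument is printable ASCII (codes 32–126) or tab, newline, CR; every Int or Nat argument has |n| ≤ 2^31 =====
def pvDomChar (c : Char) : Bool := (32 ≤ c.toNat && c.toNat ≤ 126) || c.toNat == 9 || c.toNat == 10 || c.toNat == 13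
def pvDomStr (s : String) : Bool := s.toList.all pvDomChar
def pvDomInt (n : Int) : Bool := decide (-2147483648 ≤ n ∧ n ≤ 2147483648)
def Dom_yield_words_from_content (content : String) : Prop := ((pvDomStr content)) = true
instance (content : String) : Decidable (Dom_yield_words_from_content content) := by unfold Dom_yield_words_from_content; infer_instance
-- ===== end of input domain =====

-- B replaces A's accumulator/flush word state machine by a scan over separator
-- positions that yields the slice between consecutive separators (alternative
-- decomposition, same cost); return-value equivalence only (A yields lazily).

-- ===== PORT A =====
-- string.whitespace = ' \t\n\x0b\x0c\r'  (exact character set of CPython)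
def pyWhitespaceChars : List Char := [' ', '\t', '\n', '\x0b', '\x0c', '\r']
-- string.punctuation (exact character set of CPython)
def pyPunctuationChars : List Char :=
  ['!','"','#','$','%','&','\'','(',')','*','+',',','-','.','/',':',';','<','=','>','?','@','[','\\',']','^','_','`','{','|','}','~']

-- 'letter not in string.whitespace and letter not in string.punctuation and not letter.isdigit()'
-- (single-character 'c in s' is exactly membership of c among s's characters)
def ywAllowed (c : Char) : Bool :=
  !(pyWhitespaceChars.contains c) && !(pyPunctuationChars.contains c) && !(PySem.Chars.isdigit c)

-- the for-loop of A: state (word, yielded-so-far); the trailing word is dropped at the end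
def ywLoopA : List Char → List Char → List String → List String
  | [], _, out => out
  | c :: rest, word, out =>
    if ywAllowed c then ywLoopA rest (word ++ [c]) out
    else if word.length > 0 then ywLoopA rest [] (out ++ [String.ofList word])
    else ywLoopA rest word out

def yield_words_from_content (content : String) : List String :=
  ywLoopA content.toList [] []

-- ===== PORT B =====
-- 'letter in string.whitespace or letter in string.punctuation or letter.isdigit()'
def ywSep (c : Char) : Bool :=
  pyWhitespaceChars.contains c || pyPunctuationChars.contains c || PySem.Chars.isdigit c

-- the for-loop of B: state prev = index of the last separator (-1 initially);
-- content[prev+1:index] ported as PySem.List.slice on the character list (exact)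
def ywLoopB (cs : List Char) : List (Int × Char) → Int → List String → List String
  | [], _, out => out
  | (index, c) :: rest, prev, out =>
    if ywSep c then
      if index - prev > 1 then
        ywLoopB cs rest index (out ++ [String.ofList (PySem.List.slice cs (some (prev + 1)) (some index))])
      else
        ywLoopB cs rest index out
    else ywLoopB cs rest prev out

def yield_words_from_content_alt (content : String) : List String :=
  ywLoopB content.toList (PySem.List.enumerate content.toList 0) (-1) []

-- ===== PRECONDITION & SPEC =====
def Spec_yield_words_from_content (content : String) (out : List String) : Prop := out = yield_words_from_content_alt content
instance (content : String) (out : List String) : Decidable (Spec_yield_words_from_content content out) := by unfold Spec_yield_words_from_content; infer_instance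

-- ===== CLAIM (what is proved, stated in full; the proofs are below) =====
def Claim_equal_yield_words_from_content : Prop := ∀ (content : String), Dom_yield_words_from_content content → Spec_yield_words_from_content content (yield_words_from_content content)

-- ===== LEMMAS AND PROOFS =====

-- the two ports test the same three conditions, negated
lemma ywAllowed_eq_not_sep (c : Char) : ywAllowed c = !(ywSep c) := by
  simp [ywAllowed, ywSep]

-- loop invariant: after i characters, A's word is exactly the slice of cs from
-- the position after the last separator (p-1) up to i, and both outputs agree
lemma yw_inv (rest : List Char) : ∀ (cs : List Char) (p i : Nat) (out : List String),
    p ≤ i → i ≤ cs.length → rest = cs.drop i →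
    ywLoopA rest ((cs.drop p).take (i - p)) out
      = ywLoopB cs (PySem.List.enumerate rest (i : Int)) ((p : Int) - 1) out := by
  induction rest with
  | nil => intro cs p i out _ _ _; simp [ywLoopA, ywLoopB, PySem.List.enumerate]
  | cons c rest' ih =>
    intro cs p i out hpi hil hrest
    have hi : i < cs.length := by
      by_contra h
      have : cs.drop i = [] := List.drop_eq_nil_of_le (by omega)
      rw [← hrest] at this; simp at this
    have hci : cs[i]? = some c := by
      have h0 : (cs.drop i)[0]? = some c := by rw [← hrest]; rfl
      rw [List.getElem?_drop] at h0; simpa using h0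
    have hrest' : rest' = cs.drop (i + 1) := by
      have h0 : (cs.drop i).tail = cs.drop (i + 1) := List.tail_drop
      rw [← hrest] at h0; simpa using h0
    have hwlen : ((cs.drop p).take (i - p)).length = i - p := by
      simp [List.length_take, List.length_drop]; omega
    rw [PySem.List.enumerate_cons]
    by_cases hs : ywSep c
    · -- separator: A flushes (or keeps empty word), B records a new prev
      have hA : ywAllowed c = false := by rw [ywAllowed_eq_not_sep, hs]; rfl
      by_cases hgap : p < i
      · -- non-empty word: both emit the same string
        have hslice : PySem.List.slice cs (some ((p : Int) - 1 + 1)) (some (i : Int))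
            = (cs.drop p).take (i - p) := by
          have : ((p : Int) - 1 + 1) = (p : Int) := by ring
          rw [this, PySem.List.slice_natCast]
        have := ih cs (i + 1) (i + 1) (out ++ [String.ofList ((cs.drop p).take (i - p))])
          (by omega) (by omega) hrest'
        simp only [ywLoopA, ywLoopB, hA, hs, if_false, if_true, Bool.false_eq_true,
          hwlen, hslice] at *
        rw [if_pos (by omega), if_pos (by omega : (i : Int) - ((p : Int) - 1) > 1)]
        simpa [show (i : Int) + 1 - 1 = (i : Int) by ring, List.take_zero] using this
      · -- empty word: nothing emitted, prev moves to i
        have hp : p = i := by omega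
        have hword : (cs.drop p).take (i - p) = [] := by
          subst hp; simp
        have := ih cs (i + 1) (i + 1) out (by omega) (by omega) hrest'
        simp only [ywLoopA, ywLoopB, hA, hs, if_true, Bool.false_eq_true, if_false,
          hword] at *
        rw [if_neg (by simp), if_neg (by omega : ¬ ((i : Int) - ((p : Int) - 1) > 1))]
        simpa [show (i : Int) + 1 - 1 = (i : Int) by ring] using this
    · -- allowed character: A appends to word, B keeps prev
      have hA : ywAllowed c = true := by
        rw [ywAllowed_eq_not_sep]; simp [hs]
      have hword : (cs.drop p).take (i + 1 - p) = (cs.drop p).take (i - p) ++ [c] := by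
        have h1 : (cs.drop p)[i - p]? = some c := by
          rw [List.getElem?_drop]
          rwa [show p + (i - p) = i by omega]
        rw [show i + 1 - p = (i - p) + 1 by omega, List.take_add_one, h1]
        rfl
      have := ih cs p (i + 1) out (by omega) (by omega) hrest'
      simp only [ywLoopA, ywLoopB, hA, hs, if_true, if_false, Bool.false_eq_true] at *
      rw [← hword]
      simpa using this

-- ===== VERDICT (by name: the statement is the Claim_ definition above) =====
theorem yield_words_from_content_spec : Claim_equal_yield_words_from_content := by
  intro content _
  unfold Spec_yield_words_from_content
  unfold yield_words_from_content yield_words_from_content_alt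
  have := yw_inv content.toList content.toList 0 0 [] (le_refl 0) (by omega) rfl
  simpa using this
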